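-- pv_equiv track=rewrite | github.com/MichelleZ/leetcode | algorithms/python/getEqualSubstringsWithinBudget/getEqualSubstringsWithinBudget.py | equalSubstring
-- ===== SOURCE A (Python) =====
-- def equalSubstring(s: str, t: str, maxCost: int) -> int:
--     res = 0
--     left = 0
--     right = 0
--     cost = 0
--     while right < len(s):
--         cost += abs(ord(s[right]) - ord(t[right]))
--         while left <= right and cost > maxCost:
--             cost -= abs(ord(s[left]) - ord(t[left]))
--             left += 1
--         if cost <= maxCost:
--             res = max(res, right - left + 1)
--         right += 1
--     return res
-- ===== SOURCE B (Python) =====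
-- def equalSubstring(s: str, t: str, maxCost: int) -> int:
--     n = len(s)
--     # prefix sums of per-index transform costs
--     P = [0]
--     run = 0
--     for i in range(n):
--         run += abs(ord(s[i]) - ord(t[i]))
--         P.append(run)
--     res = 0
--     for r in range(n):
--         # least L in [0, r+1] with P[r+1] - P[L] <= maxCost, by binary search
--         target = P[r + 1] - maxCost
--         lo, hi = 0, r + 1
--         while lo < hi:
--             mid = (lo + hi) // 2
--             if P[mid] < target:
--                 lo = mid + 1
--             else:
--                 hi = mid
--         res = max(res, r - lo + 1)
--     return res
-- ===== Notes on version B (the rewrite author's own statement) =====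
-- stated objective: alternative
-- what changed: Replaces the two-pointer sliding window by a precomputed prefix-sum array of per-index costs plus, for each right endpoint, a hand-written binary search for the smallest valid left index.
-- outside the precondition, e.g. on equalSubstring('ab', 'a', 10): A raises IndexError, B raises IndexError
import Mathlib
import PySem

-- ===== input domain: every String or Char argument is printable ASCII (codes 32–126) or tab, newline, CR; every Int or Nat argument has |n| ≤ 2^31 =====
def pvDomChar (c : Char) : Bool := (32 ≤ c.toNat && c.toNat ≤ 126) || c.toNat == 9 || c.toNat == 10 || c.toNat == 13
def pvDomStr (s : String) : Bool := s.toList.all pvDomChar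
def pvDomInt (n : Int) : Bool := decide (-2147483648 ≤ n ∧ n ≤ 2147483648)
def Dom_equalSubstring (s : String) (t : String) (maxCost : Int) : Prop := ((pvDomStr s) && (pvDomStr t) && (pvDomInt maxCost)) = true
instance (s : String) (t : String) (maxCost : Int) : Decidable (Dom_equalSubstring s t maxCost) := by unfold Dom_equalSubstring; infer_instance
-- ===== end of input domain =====

-- B replaces A's two-pointer sliding window by a prefix-sum array plus a per-endpoint
-- binary search (alternative decomposition, not faster).

-- abs(ord(s[i]) - ord(t[i])); exact whenever i < len(s) and i < len(t), which Pre_ guarantees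
-- for every index either program reads (the ' ' default is never consulted inside Pre_).
def pvCost (ls lt : List Char) (i : Nat) : Int :=
  |((ls.getD i ' ').toNat : Int) - ((lt.getD i ' ').toNat : Int)|

-- ===== PORT A =====
-- inner `while left <= right and cost > maxCost` loop
def eqsubInner (ls lt : List Char) (m : Int) (right left : Nat) (cost : Int) : Nat × Int :=
  if left ≤ right ∧ m < cost then
    eqsubInner ls lt m right (left + 1) (cost - pvCost ls lt left)
  else (left, cost)
termination_by right + 1 - left
decreasing_by omega

-- outer `while right < len(s)` loop carrying (right, left, cost, res)
def eqsubOuter (ls lt : List Char) (m : Int) (right left : Nat) (cost res : Int) : Int :=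
  if right < ls.length then
    let cost1 := cost + pvCost ls lt right
    let p := eqsubInner ls lt m right left cost1
    let res' := if p.2 ≤ m then max res ((right : Int) - (p.1 : Int) + 1) else res
    eqsubOuter ls lt m (right + 1) p.1 p.2 res'
  else res
termination_by ls.length - right
decreasing_by omega

def equalSubstring (s : String) (t : String) (maxCost : Int) : Int :=
  eqsubOuter s.toList t.toList maxCost 0 0 0 0

-- ===== PORT B =====
-- `for i in range(n): run += cost; P.append(run)` building the prefix-sum list
def eqsubPrefix (ls lt : List Char) (i : Nat) (run : Int) (P : List Int) : List Int :=
  if i < ls.length then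
    eqsubPrefix ls lt (i + 1) (run + pvCost ls lt i) (P ++ [run + pvCost ls lt i])
  else P
termination_by ls.length - i
decreasing_by omega

-- `while lo < hi` binary search for the least index with P[mid] >= target
def eqsubBS (P : List Int) (target : Int) (lo hi : Nat) : Nat :=
  if lo < hi then
    let mid := (lo + hi) / 2
    if P.getD mid 0 < target then eqsubBS P target (mid + 1) hi
    else eqsubBS P target lo mid
  else lo
termination_by hi - lo
decreasing_by all_goals omega

-- `for r in range(n): res = max(res, r - lo + 1)`
def eqsubMain (P : List Int) (m : Int) (n r : Nat) (res : Int) : Int :=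
  if r < n then
    let lo := eqsubBS P (P.getD (r + 1) 0 - m) 0 (r + 1)
    eqsubMain P m n (r + 1) (max res ((r : Int) - (lo : Int) + 1))
  else res
termination_by n - r
decreasing_by omega

def equalSubstring_alt (s : String) (t : String) (maxCost : Int) : Int :=
  eqsubMain (eqsubPrefix s.toList t.toList 0 0 [0]) maxCost s.toList.length 0 0

-- ===== PRECONDITION & SPEC =====
-- Pre_ excludes len(s) > len(t), on which the Python A raises IndexError at t[right].
def Pre_equalSubstring (s : String) (t : String) (maxCost : Int) : Prop :=
  s.toList.length ≤ t.toList.length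
instance (s : String) (t : String) (maxCost : Int) : Decidable (Pre_equalSubstring s t maxCost) := by
  unfold Pre_equalSubstring; infer_instance

def pvWitness_equalSubstring : String × String × Int := ("abcd", "bcdf", 3)

def Spec_equalSubstring (s : String) (t : String) (maxCost : Int) (out : Int) : Prop := out = equalSubstring_alt s t maxCost
instance (s : String) (t : String) (maxCost : Int) (out : Int) : Decidable (Spec_equalSubstring s t maxCost out) := by unfold Spec_equalSubstring; infer_instance

-- ===== CLAIM (what is proved, stated in full; the proofs are below) =====
def Claim_equal_equalSubstring : Prop := ∀ (s : String) (t : String) (maxCost : Int), Dom_equalSubstring s t maxCost → Pre_equalSubstring s t maxCost → Spec_equalSubstring s t maxCost (equalSubstring s t maxCost)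

-- ===== LEMMAS AND PROOFS =====

-- abstract prefix-cost function both sides are proved against
def prefP (ls lt : List Char) (k : Nat) : Int := ∑ i ∈ Finset.range k, pvCost ls lt i

lemma pvCost_nonneg (ls lt : List Char) (i : Nat) : 0 ≤ pvCost ls lt i := abs_nonneg _

lemma prefP_succ (ls lt : List Char) (k : Nat) :
    prefP ls lt (k + 1) = prefP ls lt k + pvCost ls lt k := Finset.sum_range_succ _ _

lemma prefP_mono (ls lt : List Char) {i j : Nat} (h : i ≤ j) :
    prefP ls lt i ≤ prefP ls lt j := by
  induction j with
  | zero => simpa using (Nat.le_zero.mp h ▸ le_refl _)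
  | succ j ih =>
    rcases Nat.lt_or_ge i (j + 1) with h' | h'
    · have := ih (Nat.lt_succ_iff.mp h')
      have := pvCost_nonneg ls lt j
      rw [prefP_succ]; omega
    · have : i = j + 1 := le_antisymm h h'
      simp [this]

lemma eqsubPrefix_aux (ls lt : List Char) :
    ∀ k i acc, ls.length - i ≤ k → eqsubPrefix ls lt i (prefP ls lt i) acc
      = acc ++ (List.range' (i + 1) (ls.length - i)).map (prefP ls lt) := by
  intro k
  induction k with
  | zero =>
    intro i acc h
    rw [eqsubPrefix]
    have : ¬ i < ls.length := by omega
    simp [this, show ls.length - i = 0 by omega]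
  | succ k ih =>
    intro i acc h
    rw [eqsubPrefix]
    by_cases hi : i < ls.length
    · simp only [hi, if_pos]
      rw [← prefP_succ, ih (i + 1) (acc ++ [prefP ls lt (i + 1)]) (by omega)]
      have hn : ls.length - i = (ls.length - (i + 1)) + 1 := by omega
      rw [hn, List.range'_succ, List.map_cons, List.append_assoc]
      rfl
    · simp [hi, show ls.length - i = 0 by omega]

lemma eqsubPrefix_spec (ls lt : List Char) :
    eqsubPrefix ls lt 0 0 [0] = (List.range (ls.length + 1)).map (prefP ls lt) := by
  have h0 : prefP ls lt 0 = 0 := by simp [prefP]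
  have := eqsubPrefix_aux ls lt ls.length 0 [0] (by omega)
  rw [h0] at this
  rw [this, List.range_eq_range', List.range'_succ, List.map_cons, ← h0]
  rfl

lemma plist_getD (ls lt : List Char) (k : Nat) (hk : k ≤ ls.length) :
    ((List.range (ls.length + 1)).map (prefP ls lt)).getD k 0 = prefP ls lt k := by
  rw [List.getD_eq_getElem?_getD]
  simp [Nat.lt_succ_of_le hk]

lemma eqsubBS_spec (ls lt : List Char) (target : Int) :
    ∀ k lo hi, hi - lo ≤ k → lo ≤ hi → hi ≤ ls.length + 1 →
      lo ≤ eqsubBS ((List.range (ls.length + 1)).map (prefP ls lt)) target lo hi ∧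
      eqsubBS ((List.range (ls.length + 1)).map (prefP ls lt)) target lo hi ≤ hi ∧
      (∀ i, lo ≤ i → i < eqsubBS ((List.range (ls.length + 1)).map (prefP ls lt)) target lo hi →
        prefP ls lt i < target) ∧
      (eqsubBS ((List.range (ls.length + 1)).map (prefP ls lt)) target lo hi < hi →
        target ≤ prefP ls lt (eqsubBS ((List.range (ls.length + 1)).map (prefP ls lt)) target lo hi)) := by
  intro k
  induction k with
  | zero =>
    intro lo hi hk hlo hhi
    have : lo = hi := by omega
    subst this
    rw [eqsubBS]
    simp only [lt_irrefl, if_false]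
    exact ⟨le_rfl, le_rfl, fun i h1 h2 => absurd (lt_of_le_of_lt h1 h2) (lt_irrefl _),
      fun h => h.elim⟩
  | succ k IH =>
    intro lo hi hk hlo hhi
    rw [eqsubBS]
    by_cases h : lo < hi
    · simp only [h, if_pos]
      rw [plist_getD ls lt _ (by omega)]
      by_cases hc : prefP ls lt ((lo + hi) / 2) < target
      · simp only [hc, if_pos]
        obtain ⟨h1, h2, h3, h4⟩ := IH ((lo + hi) / 2 + 1) hi (by omega) (by omega) hhi
        refine ⟨by omega, h2, ?_, h4⟩
        intro i hi1 hi2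
        by_cases him : i ≤ (lo + hi) / 2
        · exact lt_of_le_of_lt (prefP_mono ls lt him) hc
        · exact h3 i (by omega) hi2
      · simp only [hc, if_neg, not_false_iff]
        obtain ⟨h1, h2, h3, h4⟩ := IH lo ((lo + hi) / 2) (by omega) (by omega) (by omega)
        refine ⟨h1, by omega, h3, ?_⟩
        intro _
        by_cases hb : eqsubBS ((List.range (ls.length + 1)).map (prefP ls lt)) target lo ((lo + hi) / 2) < (lo + hi) / 2
        · exact h4 hb
        · have : eqsubBS ((List.range (ls.length + 1)).map (prefP ls lt)) target lo ((lo + hi) / 2) = (lo + hi) / 2 := by omega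
          rw [this]
          omega
    · simp only [h, if_false]
      exact ⟨le_rfl, hlo, fun i h1 h2 => absurd (lt_of_le_of_lt h1 h2) (lt_irrefl _),
        fun hlt => hlt.elim⟩

lemma eqsubInner_spec (ls lt : List Char) (m : Int) (r : Nat) :
    ∀ k left, r + 1 - left ≤ k → left ≤ r + 1 →
      left ≤ (eqsubInner ls lt m r left (prefP ls lt (r + 1) - prefP ls lt left)).1 ∧
      (eqsubInner ls lt m r left (prefP ls lt (r + 1) - prefP ls lt left)).1 ≤ r + 1 ∧
      (eqsubInner ls lt m r left (prefP ls lt (r + 1) - prefP ls lt left)).2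
        = prefP ls lt (r + 1) - prefP ls lt (eqsubInner ls lt m r left (prefP ls lt (r + 1) - prefP ls lt left)).1 ∧
      ((eqsubInner ls lt m r left (prefP ls lt (r + 1) - prefP ls lt left)).2 ≤ m ∨
        (eqsubInner ls lt m r left (prefP ls lt (r + 1) - prefP ls lt left)).1 = r + 1) ∧
      (∀ l, left ≤ l → l < (eqsubInner ls lt m r left (prefP ls lt (r + 1) - prefP ls lt left)).1 →
        m < prefP ls lt (r + 1) - prefP ls lt l) := by
  intro k
  induction k with
  | zero =>
    intro left hk hle
    have hl : left = r + 1 := by omega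
    rw [eqsubInner]
    have : ¬ (left ≤ r ∧ m < prefP ls lt (r + 1) - prefP ls lt left) := by
      intro ⟨h1, _⟩; omega
    rw [if_neg this]
    exact ⟨le_rfl, hle, rfl, Or.inr hl, fun l h1 h2 => absurd (lt_of_le_of_lt h1 h2) (lt_irrefl _)⟩
  | succ k IH =>
    intro left hk hle
    rw [eqsubInner]
    by_cases hc : left ≤ r ∧ m < prefP ls lt (r + 1) - prefP ls lt left
    · rw [if_pos hc]
      have hstep : prefP ls lt (r + 1) - prefP ls lt left - pvCost ls lt left
          = prefP ls lt (r + 1) - prefP ls lt (left + 1) := by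
        rw [prefP_succ ls lt left]; ring
      rw [hstep]
      obtain ⟨h1, h2, h3, h4, h5⟩ := IH (left + 1) (by omega) (by omega)
      refine ⟨by omega, h2, h3, h4, ?_⟩
      intro l hl1 hl2
      by_cases hll : l = left
      · subst hll; exact hc.2
      · exact h5 l (by omega) hl2
    · rw [if_neg hc]
      refine ⟨le_rfl, hle, rfl, ?_, fun l h1 h2 => absurd (lt_of_le_of_lt h1 h2) (lt_irrefl _)⟩
      by_cases hlr : left ≤ r
      · left
        by_contra hm
        exact hc ⟨hlr, by omega⟩
      · right; omega

lemma eqsubOuter_eq_main (ls lt : List Char) (m : Int) :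
    ∀ k r left res, ls.length - r ≤ k → r ≤ ls.length → left ≤ r →
      (∀ l, l < left → m < prefP ls lt r - prefP ls lt l) → 0 ≤ res →
      eqsubOuter ls lt m r left (prefP ls lt r - prefP ls lt left) res
        = eqsubMain ((List.range (ls.length + 1)).map (prefP ls lt)) m ls.length r res := by
  intro k
  induction k with
  | zero =>
    intro r left res hk hr hlr hinf hres
    rw [eqsubOuter, eqsubMain, if_neg (by omega), if_neg (by omega)]
  | succ k IH =>
    intro r left res hk hr hlr hinf hres
    rw [eqsubOuter, eqsubMain]
    by_cases h : r < ls.length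
    · rw [if_pos h, if_pos h]
      simp only
      have hcost : prefP ls lt r - prefP ls lt left + pvCost ls lt r
          = prefP ls lt (r + 1) - prefP ls lt left := by rw [prefP_succ ls lt r]; ring
      rw [hcost, plist_getD ls lt (r + 1) (by omega)]
      obtain ⟨h1, h2, h3, h4, h5⟩ := eqsubInner_spec ls lt m r (r + 2) left (by omega) (by omega)
      set p := eqsubInner ls lt m r left (prefP ls lt (r + 1) - prefP ls lt left) with hp
      obtain ⟨b1, b2, b3, b4⟩ := eqsubBS_spec ls lt (prefP ls lt (r + 1) - m) (r + 1) 0 (r + 1)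
        (by omega) (by omega) (by omega)
      set b := eqsubBS ((List.range (ls.length + 1)).map (prefP ls lt))
        (prefP ls lt (r + 1) - m) 0 (r + 1) with hb
      have hinf' : ∀ l, l < p.1 → m < prefP ls lt (r + 1) - prefP ls lt l := by
        intro l hl
        by_cases hll : l < left
        · have hi1 := hinf l hll
          have hi2 := prefP_mono ls lt (show r ≤ r + 1 by omega)
          omega
        · exact h5 l (by omega) hl
      have hbp : b = p.1 := by
        by_cases hcmp : b < p.1
        · have hfeas := b4 (by omega)
          have := hinf' b hcmp
          omega
        · by_cases hcmp2 : p.1 < b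
          · have hfe : p.2 ≤ m := by
              rcases h4 with h' | h'
              · exact h'
              · omega
            rw [h3] at hfe
            have := b3 p.1 (Nat.zero_le _) hcmp2
            omega
          · omega
      have hres' : (if p.2 ≤ m then max res ((r : Int) - (p.1 : Int) + 1) else res)
          = max res ((r : Int) - (b : Int) + 1) := by
        rw [hbp]
        by_cases hm : p.2 ≤ m
        · rw [if_pos hm]
        · rw [if_neg hm]
          have hp1 : p.1 = r + 1 := by
            rcases h4 with h' | h'
            · exact absurd h' hm
            · exact h'
          rw [hp1]
          have hz : (r : Int) - ((r + 1 : Nat) : Int) + 1 = 0 := by push_cast; ring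
          rw [hz, max_eq_left hres]
      rw [hres', h3]
      exact IH (r + 1) p.1 _ (by omega) (by omega) h2
        hinf' (le_trans hres (le_max_left _ _))
    · rw [if_neg h, if_neg h]

-- ===== VERDICT (by name: the statement is the Claim_ definition above) =====
theorem equalSubstring_spec : Claim_equal_equalSubstring := by
  intro s t m _ _
  unfold Spec_equalSubstring equalSubstring equalSubstring_alt
  rw [eqsubPrefix_spec]
  have h := eqsubOuter_eq_main s.toList t.toList m s.toList.length 0 0 0 le_rfl
      (Nat.zero_le _) le_rfl (fun l hl => absurd hl (Nat.not_lt_zero l)) le_rfl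
  simpa using h
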